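-- pv_equiv track=rewrite | github.com/oregpt/agenticportal | app/agentic-portal/TESTING/webapp-harness/run_use_test.py | prioritize_use_paths
-- ===== SOURCE A (Python) =====
-- def prioritize_use_paths(paths: list[str], limit: int = 8) -> list[str]:
--     keys = ("dashboard", "report", "setting", "wallet", "account", "action")
--
--     def score(p: str) -> int:
--         s = 0
--         lp = p.lower()
--         for i, k in enumerate(keys):
--             if k in lp:
--                 s += 100 - i * 5
--         s -= p.count("/") * 2
--         return s
--
--     uniq = list(dict.fromkeys(paths))
--     return sorted(uniq, key=lambda p: (-score(p), p))[:limit]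
-- ===== SOURCE B (Python) =====
-- def prioritize_use_paths(paths: list[str], limit: int = 8) -> list[str]:
--     keys = ("dashboard", "report", "setting", "wallet", "account", "action")
--
--     def score(p: str) -> int:
--         s = 0
--         lp = p.lower()
--         for i, k in enumerate(keys):
--             if k in lp:
--                 s += 100 - i * 5
--         s -= p.count("/") * 2
--         return s
--
--     seen = set()
--     ordered = []  # (-score(p), p) pairs, kept in ascending order
--     for p in paths:
--         if p not in seen:
--             seen.add(p)
--             kp = (-score(p), p)
--             lo, hi = 0, len(ordered)
--             while lo < hi:
--                 mid = (lo + hi) // 2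
--                 if ordered[mid] < kp:
--                     lo = mid + 1
--                 else:
--                     hi = mid
--             ordered.insert(lo, kp)
--     return [p for _, p in ordered[:limit]]
-- ===== Notes on version B (the rewrite author's own statement) =====
-- stated objective: alternative
-- what changed: B replaces A's dedup-then-full-sort-then-slice pipeline with a single pass over paths that skips already-seen paths via a set and binary-search-inserts (-score, path) pairs into an incrementally maintained ordered list, projecting the paths after the same slice.
import Mathlib
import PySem

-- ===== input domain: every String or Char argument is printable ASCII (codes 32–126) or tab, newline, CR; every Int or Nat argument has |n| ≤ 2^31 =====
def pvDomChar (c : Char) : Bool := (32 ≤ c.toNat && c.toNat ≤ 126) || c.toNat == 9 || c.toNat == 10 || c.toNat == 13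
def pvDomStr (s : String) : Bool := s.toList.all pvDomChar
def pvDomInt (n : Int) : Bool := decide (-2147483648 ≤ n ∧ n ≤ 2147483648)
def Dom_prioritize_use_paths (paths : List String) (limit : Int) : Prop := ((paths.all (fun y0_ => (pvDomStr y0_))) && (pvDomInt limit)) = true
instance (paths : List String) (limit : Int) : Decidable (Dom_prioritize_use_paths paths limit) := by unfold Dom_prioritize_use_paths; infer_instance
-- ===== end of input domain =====

-- B replaces A's dedup-then-full-sort-then-slice pipeline with a single pass that skips
-- already-seen paths and binary-search-inserts (-score, path) pairs into an incrementally
-- maintained ordered list (objective: alternative).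

-- ===== PORT A =====
-- the keys tuple (shared: both Pythons contain it verbatim)
def pvKeys : List String := ["dashboard", "report", "setting", "wallet", "account", "action"]

-- the nested 'score' helper (shared: byte-identical in Source A and Source B)
def pvScore (p : String) : Int :=
  let lp := PySem.Str.lower p
  let s : Int := (PySem.List.enumerate pvKeys 0).foldl
    (fun s ik => if PySem.Str.isIn ik.2 lp then s + (100 - ik.1 * 5) else s) 0
  s - (PySem.Str.count p "/" : Int) * 2

def prioritize_use_paths (paths : List String) (limit : Int) : List String :=
  PySem.List.slice
    (PySem.List.sorted2 (PySem.List.dedup paths) (fun p => -(pvScore p)) (fun p => p))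
    none (some limit)

-- ===== PORT B =====
-- Python tuple comparison 'ordered[mid] < kp' on (int, str) pairs (lexicographic, strict)
def pvLtPair (a b : Int × String) : Bool :=
  decide (a.1 < b.1) || (decide (a.1 = b.1) && decide (a.2 < b.2))

-- Source B's 'lo, hi = 0, len(ordered); while lo < hi: …' binary-search loop.
-- 'ordered[mid]' is ported with pyGetD: 0 ≤ lo ≤ mid < hi ≤ len(ordered) throughout,
-- so the index is always in range and the default is never used.
def pvBisectGo (ordered : List (Int × String)) (kp : Int × String) (lo hi : Nat) : Nat :=
  if lo < hi then
    let mid := (lo + hi) / 2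
    if pvLtPair (PySem.List.pyGetD ordered (mid : Int) (0, "")) kp then
      pvBisectGo ordered kp (mid + 1) hi
    else
      pvBisectGo ordered kp lo mid
  else lo
termination_by hi - lo
decreasing_by all_goals omega

-- one iteration of Source B's 'for p in paths' loop over the state (seen, ordered)
def pvStepB (st : PySem.Set String × List (Int × String)) (p : String) :
    PySem.Set String × List (Int × String) :=
  if st.1.contains p then st
  else
    let kp : Int × String := (-(pvScore p), p)
    let lo := pvBisectGo st.2 kp 0 st.2.length
    (st.1.add p, PySem.List.insert st.2 (lo : Int) kp)

def prioritize_use_paths_alt (paths : List String) (limit : Int) : List String :=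
  let st := paths.foldl pvStepB (PySem.Set.empty, [])
  (PySem.List.slice st.2 none (some limit)).map Prod.snd

-- ===== PRECONDITION & SPEC =====
def Spec_prioritize_use_paths (paths : List String) (limit : Int) (out : List String) : Prop := out = prioritize_use_paths_alt paths limit
instance (paths : List String) (limit : Int) (out : List String) : Decidable (Spec_prioritize_use_paths paths limit out) := by unfold Spec_prioritize_use_paths; infer_instance

-- ===== CLAIM (what is proved, stated in full; the proofs are below) =====
def Claim_equal_prioritize_use_paths : Prop := ∀ (paths : List String) (limit : Int), Dom_prioritize_use_paths paths limit → Spec_prioritize_use_paths paths limit (prioritize_use_paths paths limit)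

-- ===== LEMMAS AND PROOFS =====

-- A's comparison, as sorted2 unfolds it (new element a inserted before existing b)
def pvBeforeA (a b : String) : Bool :=
  decide (-(pvScore a) < -(pvScore b)) ||
    (!decide (-(pvScore b) < -(pvScore a)) && decide (a < b))

-- A's sort, written as the insertBy fold sorted2 is defined to be
def pvFA (l : List String) : List String :=
  l.foldl (fun acc x => PySem.List.insertBy pvBeforeA x acc) []

def pvTag (p : String) : Int × String := (-(pvScore p), p)

-- linear "insert before the first element that is not < kp" (proof-side description
-- of what B's binary-search insert does on a sorted list)
def pvInsPair (kp : Int × String) : List (Int × String) → List (Int × String)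
  | [] => [kp]
  | x :: xs => if pvLtPair x kp then x :: pvInsPair kp xs else kp :: x :: xs

theorem pvSorted2_eq_fA (l : List String) :
    PySem.List.sorted2 l (fun p => -(pvScore p)) (fun p => p) = pvFA l := rfl

theorem pvMem_fA (l : List String) (y : String) : y ∈ pvFA l ↔ y ∈ l := by
  rw [← pvSorted2_eq_fA]
  exact (PySem.List.sorted2_perm l (fun p => -(pvScore p)) (fun p => p) false).mem_iff

theorem pvLt_trans (a b c : Int × String) (h1 : pvLtPair a b = true)
    (h2 : pvLtPair b c = true) : pvLtPair a c = true := by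
  simp only [pvLtPair, Bool.or_eq_true, Bool.and_eq_true, decide_eq_true_eq] at *
  rcases h1 with h1 | ⟨h1, h1'⟩ <;> rcases h2 with h2 | ⟨h2, h2'⟩
  · exact Or.inl (lt_trans h1 h2)
  · exact Or.inl (by omega)
  · exact Or.inl (by omega)
  · exact Or.inr ⟨by omega, lt_trans h1' h2'⟩

theorem pvLt_total (a b : Int × String) (h : a.2 ≠ b.2) :
    pvLtPair a b = true ∨ pvLtPair b a = true := by
  simp only [pvLtPair, Bool.or_eq_true, Bool.and_eq_true, decide_eq_true_eq]
  rcases lt_trichotomy a.1 b.1 with h1 | h1 | h1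
  · exact Or.inl (Or.inl h1)
  · rcases lt_trichotomy a.2 b.2 with h2 | h2 | h2
    · exact Or.inl (Or.inr ⟨h1, h2⟩)
    · exact absurd h2 h
    · exact Or.inr (Or.inr ⟨h1.symm, h2⟩)
  · exact Or.inr (Or.inl h1)

theorem pvBefore_iff (p y : String) (h : y ≠ p) :
    pvBeforeA p y = !pvLtPair (pvTag y) (pvTag p) := by
  unfold pvBeforeA pvLtPair pvTag
  rcases lt_trichotomy (-(pvScore p)) (-(pvScore y)) with h2 | h2 | h2
  · simp [h2, lt_asymm h2, h2.ne']
  · rcases lt_trichotomy p y with h3 | h3 | h3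
    · simp [h2, h3, lt_asymm h3]
    · exact absurd h3.symm h
    · simp [h2, h3, lt_asymm h3]
  · simp [h2, lt_asymm h2]

theorem pvIns_map (p : String) (ys : List String) (h : p ∉ ys) :
    (PySem.List.insertBy pvBeforeA p ys).map pvTag = pvInsPair (pvTag p) (ys.map pvTag) := by
  induction ys with
  | nil => rfl
  | cons y ys ih =>
    have hy : y ≠ p := fun e => h (e ▸ List.mem_cons_self)
    have hrest : p ∉ ys := fun e => h (List.mem_cons_of_mem _ e)
    simp only [PySem.List.insertBy, List.map_cons, pvInsPair, pvBefore_iff p y hy]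
    by_cases hb : pvLtPair (pvTag y) (pvTag p)
    · simp [hb, ih hrest]
    · simp [hb]

theorem pvMem_insPair (kp y : Int × String) (xs : List (Int × String)) :
    y ∈ pvInsPair kp xs ↔ y = kp ∨ y ∈ xs := by
  induction xs with
  | nil => simp [pvInsPair]
  | cons x xs ih =>
    by_cases hb : pvLtPair x kp <;> simp [pvInsPair, hb, ih] <;> tauto

theorem pvPairwise_insPair (kp : Int × String) (xs : List (Int × String))
    (hs : xs.Pairwise (fun a b => pvLtPair a b = true))
    (htot : ∀ x ∈ xs, pvLtPair x kp = true ∨ pvLtPair kp x = true) :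
    (pvInsPair kp xs).Pairwise (fun a b => pvLtPair a b = true) := by
  induction xs with
  | nil => simp [pvInsPair]
  | cons x xs ih =>
    rcases List.pairwise_cons.1 hs with ⟨hx, hxs⟩
    by_cases hb : pvLtPair x kp = true
    · simp only [pvInsPair, if_pos hb]
      refine List.pairwise_cons.2 ⟨?_, ih hxs (fun z hz => htot z (List.mem_cons_of_mem _ hz))⟩
      intro y hy
      rcases (pvMem_insPair kp y xs).1 hy with rfl | hy
      · exact hb
      · exact hx y hy
    · simp only [pvInsPair, if_neg hb]
      have hkx : pvLtPair kp x = true := by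
        rcases htot x List.mem_cons_self with h | h
        · exact absurd h hb
        · exact h
      refine List.pairwise_cons.2 ⟨?_, hs⟩
      intro y hy
      rcases List.mem_cons.1 hy with rfl | hy
      · exact hkx
      · exact pvLt_trans kp x y hkx (hx y hy)

theorem pvInsPair_eq_takeWhile (kp : Int × String) (xs : List (Int × String)) :
    pvInsPair kp xs
      = xs.takeWhile (fun x => pvLtPair x kp) ++ kp :: xs.dropWhile (fun x => pvLtPair x kp) := by
  induction xs with
  | nil => rfl
  | cons x xs ih =>
    by_cases hb : pvLtPair x kp <;>
      simp [pvInsPair, List.takeWhile_cons, List.dropWhile_cons, hb, ih]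

-- on a strictly ascending list, positions below the (< kp)-prefix length hold elements < kp
theorem pvChar_lt (kp : Int × String) :
    ∀ (xs : List (Int × String)), xs.Pairwise (fun a b => pvLtPair a b = true) →
      ∀ (i : Nat) (h : i < xs.length),
        i < (xs.takeWhile (fun x => pvLtPair x kp)).length → pvLtPair xs[i] kp = true := by
  intro xs
  induction xs with
  | nil => intro _ i h; simp at h
  | cons x t ih =>
    intro hp i h hlt
    rcases List.pairwise_cons.1 hp with ⟨_, ht⟩
    by_cases hpx : pvLtPair x kp = true
    · cases i with
      | zero => simpa using hpx
      | succ j =>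
        have hj : j < (t.takeWhile (fun x => pvLtPair x kp)).length := by
          simp [hpx] at hlt; omega
        simpa using ih ht j (by simpa using h) hj
    · simp [hpx] at hlt

-- and positions at or beyond it hold elements that are not < kp
theorem pvChar_ge (kp : Int × String) :
    ∀ (xs : List (Int × String)), xs.Pairwise (fun a b => pvLtPair a b = true) →
      ∀ (i : Nat) (h : i < xs.length),
        (xs.takeWhile (fun x => pvLtPair x kp)).length ≤ i → pvLtPair xs[i] kp = false := by
  intro xs
  induction xs with
  | nil => intro _ i h; simp at h
  | cons x t ih =>
    intro hp i h hge
    rcases List.pairwise_cons.1 hp with ⟨hx, ht⟩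
    by_cases hpx : pvLtPair x kp = true
    · cases i with
      | zero => simp [hpx] at hge
      | succ j =>
        have hj : (t.takeWhile (fun x => pvLtPair x kp)).length ≤ j := by
          simp [hpx] at hge; omega
        simpa using ih ht j (by simpa using h) hj
    · cases i with
      | zero =>
        have hx0 : pvLtPair x kp = false := Bool.eq_false_iff.mpr (fun e => hpx e)
        simpa using hx0
      | succ j =>
        have hjt : j < t.length := by simpa using h
        by_contra hc
        have hcj : pvLtPair (t[j]'hjt) kp = true := by
          cases hb : pvLtPair (t[j]'hjt) kp
          · exact absurd (by simpa using hb) hc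
          · rfl
        exact hpx (pvLt_trans x (t[j]'hjt) kp (hx _ (List.getElem_mem hjt)) hcj)

theorem pvBisectGo_spec (xs : List (Int × String)) (kp : Int × String)
    (hs : xs.Pairwise (fun a b => pvLtPair a b = true)) :
    ∀ (k lo hi : Nat), hi - lo ≤ k →
      lo ≤ (xs.takeWhile (fun x => pvLtPair x kp)).length →
      (xs.takeWhile (fun x => pvLtPair x kp)).length ≤ hi →
      hi ≤ xs.length →
      pvBisectGo xs kp lo hi = (xs.takeWhile (fun x => pvLtPair x kp)).length := by
  intro k
  induction k with
  | zero =>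
    intro lo hi hk h1 h2 h3
    have hlh : ¬ lo < hi := by omega
    rw [pvBisectGo]
    simp only [hlh, if_false]
    omega
  | succ k ih =>
    intro lo hi hk h1 h2 h3
    rw [pvBisectGo]
    by_cases hlh : lo < hi
    · have hmlen : (lo + hi) / 2 < xs.length := by omega
      simp only [hlh, if_true, PySem.List.pyGetD_natCast, List.getD_eq_getElem?_getD,
        List.getElem?_eq_getElem hmlen, Option.getD_some]
      by_cases hp : pvLtPair xs[(lo + hi) / 2] kp = true
      · rw [if_pos hp]
        have hmid : (lo + hi) / 2 < (xs.takeWhile (fun x => pvLtPair x kp)).length := by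
          by_contra hc2
          rw [pvChar_ge kp xs hs _ hmlen (by omega)] at hp
          exact Bool.false_ne_true hp
        exact ih ((lo + hi) / 2 + 1) hi (by omega) (by omega) h2 h3
      · rw [if_neg hp]
        have hmid : (xs.takeWhile (fun x => pvLtPair x kp)).length ≤ (lo + hi) / 2 := by
          by_contra hc2
          exact hp (pvChar_lt kp xs hs _ hmlen (by omega))
        exact ih lo ((lo + hi) / 2) (by omega) h1 (by omega) (by omega)
    · simp only [hlh, if_false]
      omega

-- B's binary-search insert on a strictly ascending list is the linear sorted insert
theorem pvInsert_bisect_eq (kp : Int × String) (xs : List (Int × String))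
    (hs : xs.Pairwise (fun a b => pvLtPair a b = true)) :
    PySem.List.insert xs ((pvBisectGo xs kp 0 xs.length : Nat) : Int) kp = pvInsPair kp xs := by
  have hlen : (xs.takeWhile (fun x => pvLtPair x kp)).length ≤ xs.length :=
    (List.takeWhile_prefix _).length_le
  have hgo : pvBisectGo xs kp 0 xs.length = (xs.takeWhile (fun x => pvLtPair x kp)).length :=
    pvBisectGo_spec xs kp hs xs.length 0 xs.length (by omega) (by omega) hlen le_rfl
  have h1 : xs.take (xs.takeWhile (fun x => pvLtPair x kp)).length
      = xs.takeWhile (fun x => pvLtPair x kp) := by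
    nth_rewrite 2 [← List.takeWhile_append_dropWhile (p := fun x => pvLtPair x kp) (l := xs)]
    exact List.take_left
  have h2 : xs.drop (xs.takeWhile (fun x => pvLtPair x kp)).length
      = xs.dropWhile (fun x => pvLtPair x kp) := by
    nth_rewrite 2 [← List.takeWhile_append_dropWhile (p := fun x => pvLtPair x kp) (l := xs)]
    exact List.drop_left
  rw [hgo, PySem.List.insert_natCast _ _ _ hlen, pvInsPair_eq_takeWhile, h1, h2]

theorem pvPairwise_fA_map (l : List String) (hnd : l.Nodup) :
    ((pvFA l).map pvTag).Pairwise (fun a b => pvLtPair a b = true) := by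
  induction l using List.reverseRecOn with
  | nil => simp [pvFA]
  | append_singleton l p ih =>
    rcases List.nodup_append.1 hnd with ⟨hl, _, hsep⟩
    have hpl : p ∉ l := fun hp => hsep p hp p List.mem_cons_self rfl
    have hnot : p ∉ pvFA l := fun hx => hpl ((pvMem_fA l p).1 hx)
    have hfa : pvFA (l ++ [p]) = PySem.List.insertBy pvBeforeA p (pvFA l) := by
      simp [pvFA, List.foldl_append]
    rw [hfa, pvIns_map p _ hnot]
    refine pvPairwise_insPair _ _ (ih hl) ?_
    intro x hx
    rcases List.mem_map.1 hx with ⟨q, hq, rfl⟩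
    have hqp : q ≠ p := fun e => hpl (e ▸ (pvMem_fA l q).1 hq)
    exact pvLt_total (pvTag q) (pvTag p) hqp

theorem pvOfList_append_one (pre : List String) (p : String) :
    PySem.Set.ofList (pre ++ [p]) = (PySem.Set.ofList pre).add p := by
  simp [PySem.Set.ofList, List.foldl_append]

theorem pvFoldB (l pre : List String) :
    l.foldl pvStepB (PySem.Set.ofList pre, (pvFA (PySem.Set.ofList pre)).map pvTag)
      = (PySem.Set.ofList (pre ++ l), (pvFA (PySem.Set.ofList (pre ++ l))).map pvTag) := by
  induction l generalizing pre with
  | nil => simp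
  | cons p l ih =>
    have hassoc : pre ++ p :: l = (pre ++ [p]) ++ l := by simp
    rw [List.foldl_cons, hassoc, ← ih (pre ++ [p])]
    congr 1
    by_cases hmem : p ∈ pre
    · have hc : (PySem.Set.ofList pre).contains p = true := by
        simpa using (PySem.Set.mem_ofList pre p).2 hmem
      have hadd : PySem.Set.ofList (pre ++ [p]) = PySem.Set.ofList pre := by
        rw [pvOfList_append_one, PySem.Set.add, if_pos hc]
      simp [pvStepB, hmem, hadd]
    · have hc : (PySem.Set.ofList pre).contains p = false := by
        simpa using fun hx => hmem ((PySem.Set.mem_ofList pre p).1 hx)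
      have hadd : PySem.Set.ofList (pre ++ [p]) = PySem.Set.ofList pre ++ [p] := by
        rw [pvOfList_append_one, PySem.Set.add, hc]; rfl
      have hnot : p ∉ pvFA (PySem.Set.ofList pre) := by
        rw [pvMem_fA]
        exact fun hx => hmem ((PySem.Set.mem_ofList pre p).1 hx)
      have hfa : pvFA (PySem.Set.ofList pre ++ [p])
          = PySem.List.insertBy pvBeforeA p (pvFA (PySem.Set.ofList pre)) := by
        simp [pvFA, List.foldl_append]
      have hpw := pvPairwise_fA_map (PySem.Set.ofList pre) (PySem.Set.nodup_ofList pre)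
      simp only [pvStepB, hc, Bool.false_eq_true, if_false]
      refine Prod.ext ?_ ?_
      · exact (pvOfList_append_one pre p).symm
      · show PySem.List.insert ((pvFA (PySem.Set.ofList pre)).map pvTag) _ _
            = (pvFA (PySem.Set.ofList (pre ++ [p]))).map pvTag
        rw [hadd, hfa, pvIns_map p _ hnot]
        exact pvInsert_bisect_eq (pvTag p) _ hpw

theorem pvSlice_map {α β : Type} (f : α → β) (xs : List α) (b : Int) :
    PySem.List.slice (xs.map f) none (some b) = (PySem.List.slice xs none (some b)).map f := by
  simp [PySem.List.slice, List.map_take]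

-- ===== VERDICT (by name: the statement is the Claim_ definition above) =====
theorem prioritize_use_paths_spec : Claim_equal_prioritize_use_paths := by
  intro paths limit _
  unfold Spec_prioritize_use_paths prioritize_use_paths prioritize_use_paths_alt
  have h0 : (PySem.Set.empty : PySem.Set String) = PySem.Set.ofList [] := rfl
  have h1 : ([] : List (Int × String)) = (pvFA (PySem.Set.ofList ([] : List String))).map pvTag := rfl
  rw [pvSorted2_eq_fA, PySem.List.dedup_eq_ofList, h0, h1, pvFoldB paths []]
  simp [pvSlice_map, List.map_map, Function.comp_def, pvTag]
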